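-- pv_equiv track=rewrite | github.com/project-rig/rig | rig/machine_control/scp_communicator.py | _get_data_type_from_offset_and_size
-- ===== SOURCE A (Python) =====
-- import enum
--
-- class DataType(enum.IntEnum):
--     """Data size types."""
--     BYTE = 0
--     SHORT = 1
--     WORD = 2
--
-- def _get_data_type_from_offset_and_size(address, n_bytes):
--     """Get the best data type to use based on an address and a number of
--     bytes.
--     """
--     # Map of length & 0x3 => address & 0x3 => DataType
--     data_types = {
--         1: {n: DataType.BYTE for n in range(4)},
--         2: {n: DataType.BYTE if (n & 1) == 1 else DataType.SHORT
--             for n in range(4)},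
--         3: {n: DataType.BYTE for n in range(4)},
--         0: {
--             0: DataType.WORD,
--             1: DataType.BYTE,
--             2: DataType.SHORT,
--             3: DataType.BYTE,
--         }
--     }
--     return data_types[n_bytes & 0x3][address & 0x3]
-- ===== SOURCE B (Python) =====
-- import enum
--
-- class DataType(enum.IntEnum):
--     """Data size types."""
--     BYTE = 0
--     SHORT = 1
--     WORD = 2
--
-- def _get_data_type_from_offset_and_size(address, n_bytes):
--     """Get the best data type to use based on an address and a number of
--     bytes.
--     """
--     # Any odd bit forces byte access; a stray half-word bit forces short.
--     align = (address | n_bytes) & 0x3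
--     if align & 1:
--         return DataType.BYTE
--     elif align & 2:
--         return DataType.SHORT
--     else:
--         return DataType.WORD
-- ===== Notes on version B (the rewrite author's own statement) =====
-- stated objective: simpler
-- what changed: Replaces the nested 4x4 lookup table built on every call with a closed-form bit computation: align = (address | n_bytes) & 3, then branch on its low bits.
import Mathlib
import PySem

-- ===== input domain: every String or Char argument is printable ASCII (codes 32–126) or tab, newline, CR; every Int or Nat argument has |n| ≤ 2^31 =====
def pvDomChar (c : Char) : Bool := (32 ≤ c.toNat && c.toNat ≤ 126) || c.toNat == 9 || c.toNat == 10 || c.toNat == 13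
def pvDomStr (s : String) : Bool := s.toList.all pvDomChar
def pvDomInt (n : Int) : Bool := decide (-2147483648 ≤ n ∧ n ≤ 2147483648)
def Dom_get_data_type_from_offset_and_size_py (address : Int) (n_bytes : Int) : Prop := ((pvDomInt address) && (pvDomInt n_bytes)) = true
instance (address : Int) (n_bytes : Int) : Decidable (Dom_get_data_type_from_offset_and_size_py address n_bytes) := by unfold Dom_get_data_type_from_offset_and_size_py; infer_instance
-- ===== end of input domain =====

-- B replaces A's per-call nested 4×4 lookup table with a closed-form bit computation on (address | n_bytes) & 3 (objective: simpler).

-- ===== PORT A =====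
-- DataType.BYTE/SHORT/WORD are the Int values 0/1/2 (IntEnum).
-- The dict keys built here always cover {0,1,2,3} and the lookup keys are x & 3 ∈ [0,4),
-- so Python's [] never raises; the .getD defaults below are unreachable.
def get_data_type_from_offset_and_size_py (address : Int) (n_bytes : Int) : Int :=
  let data_types : PySem.Dict Int (PySem.Dict Int Int) :=
    ((((PySem.Dict.empty.insert 1
        ((PySem.List.pyRange 0 4 1).foldl (fun d n => d.insert n 0) PySem.Dict.empty)).insert 2
        ((PySem.List.pyRange 0 4 1).foldl
          (fun d n => d.insert n (if PySem.Int.band n 1 = 1 then 0 else 1)) PySem.Dict.empty)).insert 3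
        ((PySem.List.pyRange 0 4 1).foldl (fun d n => d.insert n 0) PySem.Dict.empty)).insert 0
        ((((PySem.Dict.empty.insert 0 2).insert 1 0).insert 2 1).insert 3 0))
  (((data_types.get? (PySem.Int.band n_bytes 3)).getD PySem.Dict.empty).get?
      (PySem.Int.band address 3)).getD 0

-- ===== PORT B =====
def get_data_type_from_offset_and_size_py_alt (address : Int) (n_bytes : Int) : Int :=
  let align := PySem.Int.band (PySem.Int.bor address n_bytes) 3
  if PySem.Int.band align 1 ≠ 0 then 0
  else if PySem.Int.band align 2 ≠ 0 then 1
  else 2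

-- ===== PRECONDITION & SPEC =====
def Spec_get_data_type_from_offset_and_size_py (address : Int) (n_bytes : Int) (out : Int) : Prop := out = get_data_type_from_offset_and_size_py_alt address n_bytes
instance (address : Int) (n_bytes : Int) (out : Int) : Decidable (Spec_get_data_type_from_offset_and_size_py address n_bytes out) := by unfold Spec_get_data_type_from_offset_and_size_py; infer_instance

-- ===== CLAIM (what is proved, stated in full; the proofs are below) =====
def Claim_equal_get_data_type_from_offset_and_size_py : Prop := ∀ (address : Int) (n_bytes : Int), Dom_get_data_type_from_offset_and_size_py address n_bytes → Spec_get_data_type_from_offset_and_size_py address n_bytes (get_data_type_from_offset_and_size_py address n_bytes)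

-- ===== LEMMAS AND PROOFS =====

-- low two bits: Nat-level facts
theorem nat_and_three (m : Nat) : m &&& 3 = m % 4 :=
  Nat.and_two_pow_sub_one_eq_mod m 2

theorem nat_and_mod_four (q m : Nat) : (q &&& m) % 4 = q % 4 &&& m % 4 := by
  have hx : m % 4 &&& 3 = m % 4 := by rw [nat_and_three]; omega
  rw [← nat_and_three (q &&& m), Nat.and_assoc, nat_and_three m, ← hx,
      Nat.and_comm (m % 4) 3, ← Nat.and_assoc, nat_and_three q,
      Nat.and_comm 3 (m % 4), hx]

theorem nat_or_mod_four (q m : Nat) : (q ||| m) % 4 = q % 4 ||| m % 4 := by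
  have h : (q ||| m) % 2 ^ 2 = q % 2 ^ 2 ||| m % 2 ^ 2 := Nat.or_mod_two_pow
  norm_num at h; exact h

-- low two bits of q &&& ~m (Python's mixed-sign AND), as a subtraction
theorem nat_sub_and_mod_four (q m : Nat) : (q - (q &&& m)) % 4 = q % 4 - (q % 4 &&& m % 4) := by
  have h1 : (q &&& m) % 4 = q % 4 &&& m % 4 := nat_and_mod_four q m
  have h2 : q &&& m ≤ q := Nat.and_le_left
  have h3 : q % 4 &&& m % 4 ≤ q % 4 := Nat.and_le_left
  omega

-- band a 3, by the sign of a
theorem band3_of_nonneg (a : Int) (ha : 0 ≤ a) : PySem.Int.band a 3 = ((a.toNat % 4 : Nat) : Int) := by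
  unfold PySem.Int.band
  rw [if_pos ha, if_pos (by norm_num), show (3 : Int).toNat = 3 from rfl, nat_and_three]

theorem band3_of_neg (a : Int) (ha : a < 0) : PySem.Int.band a 3 = ((3 - (-a - 1).toNat % 4 : Nat) : Int) := by
  unfold PySem.Int.band
  rw [if_neg (by omega), if_pos (by norm_num), show (3 : Int).toNat = 3 from rfl,
      Nat.and_comm, nat_and_three]

-- bor, by the signs of the operands
theorem bor_of_nonneg_nonneg (a b : Int) (ha : 0 ≤ a) (hb : 0 ≤ b) :
    PySem.Int.bor a b = ((a.toNat ||| b.toNat : Nat) : Int) := by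
  unfold PySem.Int.bor; rw [if_pos ha, if_pos hb]

theorem bor_of_nonneg_neg (a b : Int) (ha : 0 ≤ a) (hb : b < 0) :
    PySem.Int.bor a b = -(((-b - 1).toNat - ((-b - 1).toNat &&& a.toNat) : Nat) : Int) - 1 := by
  unfold PySem.Int.bor; rw [if_pos ha, if_neg (by omega)]

theorem bor_of_neg_nonneg (a b : Int) (ha : a < 0) (hb : 0 ≤ b) :
    PySem.Int.bor a b = -(((-a - 1).toNat - ((-a - 1).toNat &&& b.toNat) : Nat) : Int) - 1 := by
  unfold PySem.Int.bor; rw [if_neg (by omega), if_pos hb]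

theorem bor_of_neg_neg (a b : Int) (ha : a < 0) (hb : b < 0) :
    PySem.Int.bor a b = -(((-a - 1).toNat &&& (-b - 1).toNat : Nat) : Int) - 1 := by
  unfold PySem.Int.bor; rw [if_neg (by omega), if_neg (by omega)]

-- key fact: the low two bits of a | b are the OR of the low two bits
theorem key_band_bor (a b : Int) : PySem.Int.band (PySem.Int.bor a b) 3 =
    PySem.Int.bor (PySem.Int.band a 3) (PySem.Int.band b 3) := by
  rcases le_or_gt 0 a with ha | ha <;> rcases le_or_gt 0 b with hb | hb
  · -- a ≥ 0, b ≥ 0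
    rw [bor_of_nonneg_nonneg a b ha hb, band3_of_nonneg _ (Int.natCast_nonneg _),
        band3_of_nonneg a ha, band3_of_nonneg b hb,
        bor_of_nonneg_nonneg _ _ (Int.natCast_nonneg _) (Int.natCast_nonneg _)]
    simp only [Int.toNat_natCast]
    rw [nat_or_mod_four]
  · -- a ≥ 0, b < 0
    set m := a.toNat with hm
    set q := (-b - 1).toNat with hq
    rw [bor_of_nonneg_neg a b ha hb,
        band3_of_neg _ (by omega), band3_of_nonneg a ha, band3_of_neg b hb,
        bor_of_nonneg_nonneg _ _ (Int.natCast_nonneg _) (Int.natCast_nonneg _)]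
    have htn : (-(-(((q - (q &&& m) : Nat) : Int)) - 1) - 1).toNat = q - (q &&& m) := by omega
    rw [htn, nat_sub_and_mod_four]
    simp only [Int.toNat_natCast]
    have hr : m % 4 < 4 := by omega
    have hs : q % 4 < 4 := by omega
    set r := m % 4 with hrdef
    set s := q % 4 with hsdef
    interval_cases r <;> interval_cases s <;> rfl
  · -- a < 0, b ≥ 0
    set m := b.toNat with hm
    set q := (-a - 1).toNat with hq
    rw [bor_of_neg_nonneg a b ha hb,
        band3_of_neg _ (by omega), band3_of_neg a ha, band3_of_nonneg b hb,
        bor_of_nonneg_nonneg _ _ (Int.natCast_nonneg _) (Int.natCast_nonneg _)]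
    have htn : (-(-(((q - (q &&& m) : Nat) : Int)) - 1) - 1).toNat = q - (q &&& m) := by omega
    rw [htn, nat_sub_and_mod_four]
    simp only [Int.toNat_natCast]
    have hr : m % 4 < 4 := by omega
    have hs : q % 4 < 4 := by omega
    set r := m % 4 with hrdef
    set s := q % 4 with hsdef
    interval_cases r <;> interval_cases s <;> rfl
  · -- a < 0, b < 0
    set p := (-a - 1).toNat with hp
    set q := (-b - 1).toNat with hq
    rw [bor_of_neg_neg a b ha hb,
        band3_of_neg _ (by omega), band3_of_neg a ha, band3_of_neg b hb,
        bor_of_nonneg_nonneg _ _ (by positivity) (by positivity)]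
    have htn : (-(-(((p &&& q : Nat) : Int)) - 1) - 1).toNat = p &&& q := by omega
    rw [htn, nat_and_mod_four]
    simp only [Int.toNat_natCast]
    have hr : p % 4 < 4 := by omega
    have hs : q % 4 < 4 := by omega
    set r := p % 4 with hrdef
    set s := q % 4 with hsdef
    interval_cases r <;> interval_cases s <;> rfl

theorem band_three_cases (a : Int) : PySem.Int.band a 3 = 0 ∨ PySem.Int.band a 3 = 1 ∨
    PySem.Int.band a 3 = 2 ∨ PySem.Int.band a 3 = 3 := by
  rcases le_or_gt 0 a with ha | ha
  · rw [band3_of_nonneg a ha]; omega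
  · rw [band3_of_neg a ha]; omega

-- ===== VERDICT (by name: the statement is the Claim_ definition above) =====
theorem get_data_type_from_offset_and_size_py_spec : Claim_equal_get_data_type_from_offset_and_size_py := by
  intro address n_bytes _
  unfold Spec_get_data_type_from_offset_and_size_py
  unfold get_data_type_from_offset_and_size_py get_data_type_from_offset_and_size_py_alt
  rw [key_band_bor]
  rcases band_three_cases address with hx | hx | hx | hx <;>
    rcases band_three_cases n_bytes with hy | hy | hy | hy <;>
      rw [hx, hy] <;> decide
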